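-- pv_equiv track=rewrite | github.com/biodipus/Oscillation-SWM | Figure3/plot_TDR_subspace_decodingAcc.py | find_sig
-- ===== SOURCE A (Python) =====
-- def find_sig(A, l):
--     # 用于存储连续出现三个及以上0的索引
--     result_indices = []
--     count = 0
--     zero_indices = []
--
--     for index in range(len(A)):
--         if A[index] == 1:
--             count += 1
--             zero_indices.append(index)
--         else:
--             # 如果有连续的 0，检查是否达到三个或以上
--             if count >= l:
--                 result_indices.extend(zero_indices[-count:])  # 记录这部分索引
--             count = 0
--             zero_indices = []
--
--     # 检查最后一段
--     if count >= 3: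
--         result_indices.extend(zero_indices[-count:])
--     return result_indices
-- ===== SOURCE B (Python) =====
-- def find_sig(A, l):
--     n = len(A)
--     # r[i] = length of the run of consecutive 1s starting at i (0 if A[i] != 1)
--     r = [0] * (n + 1)
--     for i in range(n - 1, -1, -1):
--         if A[i] == 1:
--             r[i] = r[i + 1] + 1
--     # p[i] = length of the run of consecutive 1s ending at i (0 if A[i] != 1)
--     p = [0] * n
--     prev = 0
--     for i in range(n):
--         prev = prev + 1 if A[i] == 1 else 0
--         p[i] = prev
--     # index i qualifies iff the maximal run of 1s containing it has length >= l
--     return [i for i in range(n) if A[i] == 1 and p[i] + r[i] - 1 >= l]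
-- ===== Notes on version B (the rewrite author's own statement) =====
-- stated objective: alternative
-- what changed: B replaces A's stateful buffer-and-flush loop (running count, collected indices, flushed at each non-1 and once after the loop) by a per-index qualification test: two DP sweeps compute, for every position, the length of the 1-run ending there (p) and starting there (r), and a final comprehension keeps index i iff A[i]==1 and p[i]+r[i]-1 >= l; B also uses the threshold l uniformly where A hardcodes 3 for the trailing run.
-- intended difference: On inputs whose trailing run of 1s has length t>=1 with (t>=3) != (t>=l), A emits/omits that trailing run's indices using the leftover hardcoded threshold 3 from its final flush, while B applies the parameter l uniformly to every run; using l everywhere is what the parameterized function evidently intends. — e.g. on find_sig([1, 1, 1], 4): A returns [0, 1, 2], B returns []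
import Mathlib
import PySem

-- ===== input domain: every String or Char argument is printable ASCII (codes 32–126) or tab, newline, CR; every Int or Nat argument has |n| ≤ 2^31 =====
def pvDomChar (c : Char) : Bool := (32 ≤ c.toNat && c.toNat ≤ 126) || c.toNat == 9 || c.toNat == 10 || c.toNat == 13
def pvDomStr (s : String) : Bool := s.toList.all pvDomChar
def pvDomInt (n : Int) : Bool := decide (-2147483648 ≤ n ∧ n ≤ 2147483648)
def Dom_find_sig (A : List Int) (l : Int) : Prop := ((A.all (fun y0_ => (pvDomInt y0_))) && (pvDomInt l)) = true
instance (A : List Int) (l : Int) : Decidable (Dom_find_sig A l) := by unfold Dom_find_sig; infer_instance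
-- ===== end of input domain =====

-- B replaces A's buffer-and-flush loop by two DP sweeps (run length ending / starting at each
-- index) plus a per-index filter, and applies the threshold l uniformly where A hardcodes 3
-- for the trailing run (stated as the intended difference D_ below).

-- ===== PORT A =====
def find_sig (A : List Int) (l : Int) : List Int :=
  let st := (PySem.List.pyRange 0 (PySem.List.len A) 1).foldl
    (fun (st : List Int × Int × List Int) index =>
      if PySem.List.pyGetD A index 0 = 1 then
        (st.1, st.2.1 + 1, st.2.2 ++ [index])
      else
        ((if l ≤ st.2.1 then st.1 ++ PySem.List.slice st.2.2 (some (-st.2.1)) none else st.1),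
         0, []))
    ([], 0, [])
  if 3 ≤ st.2.1 then st.1 ++ PySem.List.slice st.2.2 (some (-st.2.1)) none else st.1

-- ===== PORT B =====
-- r in Source B: r[i] = run of 1s starting at i, built right-to-left (one extra trailing 0)
def pvSuffRun : List Int → List Int
  | [] => [0]
  | x :: xs => let rs := pvSuffRun xs; (if x = 1 then rs.headI + 1 else 0) :: rs

-- p in Source B: p[i] = run of 1s ending at i, built left-to-right with accumulator prev
def pvPrefRun : List Int → Int → List Int
  | [], _ => []
  | x :: xs, prev => let v := if x = 1 then prev + 1 else 0; v :: pvPrefRun xs v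

def find_sig_alt (A : List Int) (l : Int) : List Int :=
  let r := pvSuffRun A
  let p := pvPrefRun A 0
  (PySem.List.pyRange 0 (PySem.List.len A) 1).foldl
    (fun out i =>
      if PySem.List.pyGetD A i 0 = 1 ∧
          l ≤ PySem.List.pyGetD p i 0 + PySem.List.pyGetD r i 0 - 1
      then out ++ [i] else out) []

-- ===== PRECONDITION & SPEC =====
-- length of the trailing run of 1s of A (used only to state D_)
def pvTrail (A : List Int) : Nat := (A.reverse.takeWhile (fun x => x == 1)).length

-- On inputs whose trailing run of 1s has length t ≥ 1 with (t≥3) ≠ (t≥l), A emits/omits that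
-- run's indices using the hardcoded threshold 3 of its final flush, while B applies the
-- parameter l uniformly to every run; using l everywhere is what the parameterized function
-- evidently intends.
def D_find_sig (A : List Int) (l : Int) : Prop :=
  pvTrail A ≠ 0 ∧ ¬ ((3 ≤ (pvTrail A : Int)) ↔ (l ≤ (pvTrail A : Int)))
instance (A : List Int) (l : Int) : Decidable (D_find_sig A l) := by
  unfold D_find_sig; infer_instance

def Spec_find_sig (A : List Int) (l : Int) (out : List Int) : Prop :=
  ¬ D_find_sig A l → out = find_sig_alt A l
instance (A : List Int) (l : Int) (out : List Int) : Decidable (Spec_find_sig A l out) := by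
  unfold Spec_find_sig; infer_instance

def pvDiffWitness_find_sig : List Int × Int := ([1, 1, 1], 4)
def pvDiffWitnessOut_find_sig : (List Int) × (List Int) := ([0, 1, 2], [])

-- ===== CLAIM (what is proved, stated in full; the proofs are below) =====
def Claim_unchanged_find_sig : Prop := ∀ (A : List Int) (l : Int), Dom_find_sig A l → Spec_find_sig A l (find_sig A l)
def Claim_changed_find_sig : Prop := Dom_find_sig (pvDiffWitness_find_sig.1) (pvDiffWitness_find_sig.2) ∧ D_find_sig (pvDiffWitness_find_sig.1) (pvDiffWitness_find_sig.2) ∧ find_sig (pvDiffWitness_find_sig.1) (pvDiffWitness_find_sig.2) = pvDiffWitnessOut_find_sig.1 ∧ find_sig_alt (pvDiffWitness_find_sig.1) (pvDiffWitness_find_sig.2) = pvDiffWitnessOut_find_sig.2 ∧ pvDiffWitnessOut_find_sig.1 ≠ pvDiffWitnessOut_find_sig.2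
def Claim_exact_find_sig : Prop := ∀ (A : List Int) (l : Int), Dom_find_sig A l → D_find_sig A l → find_sig A l ≠ find_sig_alt A l

-- ===== LEMMAS AND PROOFS =====

-- A's loop body, as a function of (index, element)
def pvFA (l : Int) (st : List Int × Int × List Int) (ia : Int × Int) : List Int × Int × List Int :=
  if ia.2 = 1 then (st.1, st.2.1 + 1, st.2.2 ++ [ia.1])
  else ((if l ≤ st.2.1 then st.1 ++ PySem.List.slice st.2.2 (some (-st.2.1)) none else st.1), 0, [])

-- A's final flush
def pvFinA (st : List Int × Int × List Int) : List Int :=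
  if 3 ≤ st.2.1 then st.1 ++ PySem.List.slice st.2.2 (some (-st.2.1)) none else st.1

-- itertools-groupby-like decomposition of a list into maximal runs (value, length)
def pvGroupbyB : List Int → List (Int × Int)
  | [] => []
  | x :: xs =>
    (x, ((xs.takeWhile (· == x)).length : Int) + 1) :: pvGroupbyB (xs.dropWhile (· == x))
termination_by xs => xs.length
decreasing_by
  have := List.length_dropWhile_le (p := (· == x)) (l := xs)
  simp only [List.length_cons]; omega

-- the runs (start, length) of 1s, as a pure recursion over the groups
def pvRuns : List (Int × Int) → Int → List (Int × Int)
  | [], _ => []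
  | g :: gs, p => (if g.1 = 1 then [(p, g.2)] else []) ++ pvRuns gs (p + g.2)

-- A's emission: per-run threshold is 3 for the run reaching position n, l otherwise
def pvEmit (l n : Int) (rs : List (Int × Int)) : List Int :=
  rs.flatMap (fun r =>
    if (if r.1 + r.2 = n then (3:Int) else l) ≤ r.2 then PySem.List.pyRange r.1 (r.1 + r.2) 1 else [])

-- B's emission: uniform threshold l
def pvEmitB (l : Int) (rs : List (Int × Int)) : List Int :=
  rs.flatMap (fun r => if l ≤ r.2 then PySem.List.pyRange r.1 (r.1 + r.2) 1 else [])

-- shifting past a non-1 element does not change the runs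
theorem pvRuns_shift (x : Int) (hx : x ≠ 1) (xs : List Int) (s : Int) :
    pvRuns (pvGroupbyB (x :: xs)) s = pvRuns (pvGroupbyB xs) (s + 1) := by
  cases xs with
  | nil => simp [pvGroupbyB, pvRuns, hx]
  | cons z zs =>
    by_cases hz : z = x
    · subst hz
      simp only [pvGroupbyB, List.takeWhile_cons, List.dropWhile_cons, beq_self_eq_true,
        if_true]
      simp [pvRuns, hx]
      ring_nf
    · have hzb : (z == x) = false := by simp [hz]
      simp only [pvGroupbyB, List.takeWhile_cons, List.dropWhile_cons, hzb,
        Bool.false_eq_true, if_false]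
      simp [pvRuns, hx]

-- folding A's body over a run of ones
theorem pvFA_ones (l : Int) : ∀ (ones : List Int), (∀ y ∈ ones, y = 1) →
    ∀ (s : Int) (res zi : List Int) (c : Int),
    (PySem.List.enumerate ones s).foldl (pvFA l) (res, c, zi)
      = (res, c + (ones.length : Int), zi ++ PySem.List.pyRange s (s + ones.length) 1) := by
  intro ones
  induction ones with
  | nil => intro _ s res zi c; simp [PySem.List.pyRange_one_eq_nil]
  | cons y ys ih =>
    intro hmem s res zi c
    have hy : y = 1 := hmem y (by simp)
    rw [PySem.List.enumerate_cons, List.foldl_cons]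
    have hstep : pvFA l (res, c, zi) (s, y) = (res, c + 1, zi ++ [s]) := by
      simp [pvFA, hy]
    rw [hstep, ih (fun z hz => hmem z (by simp [hz]))]
    simp only [List.length_cons]
    rw [show c + 1 + (ys.length : Int) = c + ((ys.length + 1 : Nat) : Int) from by push_cast; ring]
    rw [List.append_assoc]
    rw [show s + ((ys.length + 1 : Nat) : Int) = s + 1 + (ys.length : Int) from by push_cast; ring]
    rw [PySem.List.pyRange_one_cons (a := s) (b := s + 1 + (ys.length : Int)) (by omega),
      List.singleton_append]

-- main invariant: A's loop + final flush over a suffix equals A's emitted runs of that suffix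
theorem pvMain (l n : Int) : ∀ (m : Nat) (xs : List Int), xs.length = m →
    ∀ (s : Int) (res : List Int), s + (xs.length : Int) = n →
    pvFinA ((PySem.List.enumerate xs s).foldl (pvFA l) (res, 0, []))
      = res ++ pvEmit l n (pvRuns (pvGroupbyB xs) s) := by
  intro m
  induction m using Nat.strong_induction_on with
  | _ m ih =>
    intro xs hlen s res hn
    cases hxs : xs with
    | nil =>
      simp [pvFinA, pvGroupbyB, pvRuns, pvEmit]
    | cons x xs' =>
      subst hxs
      by_cases hx : x = 1
      · -- leading run of ones
        subst hx
        obtain ⟨t, ht⟩ : ∃ t, t = xs'.takeWhile (· == (1:Int)) := ⟨_, rfl⟩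
        obtain ⟨d, hd⟩ : ∃ d, d = xs'.dropWhile (· == (1:Int)) := ⟨_, rfl⟩
        have hxs' : xs' = t ++ d := by rw [ht, hd, List.takeWhile_append_dropWhile]
        have htones : ∀ y ∈ (1:Int) :: t, y = 1 := by
          intro y hy
          rcases List.mem_cons.mp hy with h | h
          · exact h
          · have := List.mem_takeWhile_imp (ht ▸ h)
            simpa using this
        have hsplit : (1:Int) :: xs' = ((1:Int) :: t) ++ d := by rw [hxs']; rfl
        have hgroup : pvGroupbyB (((1:Int) :: t) ++ d) = (1, (t.length : Int) + 1) :: pvGroupbyB d := by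
          rw [show ((1:Int) :: t) ++ d = 1 :: xs' from by rw [hxs']; rfl]
          simp only [pvGroupbyB]
          rw [← ht, ← hd]
        have hlen' : ((1:Int) :: xs').length = ((1:Int) :: t).length + d.length := by
          simp [hxs']; omega
        rw [hsplit, PySem.List.enumerate_append, List.foldl_append,
          pvFA_ones l ((1:Int) :: t) htones s res [] 0]
        have hlenrun : (PySem.List.pyRange s (s + (((1:Int) :: t).length : Int)) 1).length
            = ((1:Int) :: t).length := by
          rw [PySem.List.length_pyRange_one]; omega
        have hslice : PySem.List.slice (PySem.List.pyRange s (s + (((1:Int) :: t).length : Int)) 1)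
            (some (-((((1:Int) :: t).length : Nat) : Int))) none
            = PySem.List.pyRange s (s + (((1:Int) :: t).length : Int)) 1 := by
          rw [PySem.List.slice_from_neg_natCast _ _ (by simp)]
          rw [hlenrun]; simp
        cases hD : d with
        | nil =>
          -- the run of ones reaches the end of A: A flushes it against 3
          simp only [PySem.List.enumerate_nil, List.foldl_nil, List.nil_append, zero_add]
          rw [pvFinA, hslice]
          rw [hD] at hgroup hxs'
          rw [hgroup]
          have hcast : ((t.length : Int) + 1) = (((1:Int) :: t).length : Int) := by
            simp
          have hend : s + (((1:Int) :: t).length : Int) = n := by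
            rw [← hn]
            have h1 : xs'.length = t.length := by rw [hxs']; simp
            simp [h1]
          simp only [pvRuns, pvGroupbyB, pvEmit, List.append_nil, List.flatMap_cons,
            List.flatMap_nil, if_true, hcast]
          rw [if_pos hend]
          by_cases h3 : (3:Int) ≤ (((1:Int) :: t).length : Int)
          · rw [if_pos h3, if_pos h3]
          · rw [if_neg h3, if_neg h3, List.append_nil]
        | cons y d' =>
          -- the run of ones is ended by a non-1 element y: A flushes it against l
          have hyne : y ≠ 1 := by
            have hdw : xs'.dropWhile (· == (1:Int)) = y :: d' := by rw [← hd]; exact hD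
            have h0 : 0 < (xs'.dropWhile (· == (1:Int))).length := by rw [hdw]; simp
            have hnp := List.dropWhile_get_zero_not (p := (· == (1:Int))) xs' h0
            simp only [List.get_eq_getElem] at hnp
            intro hy1
            exact hnp (by simp [hdw, hy1])
          rw [PySem.List.enumerate_cons, List.foldl_cons]
          have hstep : pvFA l (res, 0 + (((1:Int) :: t).length : Int),
              [] ++ PySem.List.pyRange s (s + (((1:Int) :: t).length : Int)) 1)
              (s + (((1:Int) :: t).length : Int), y)
              = ((if l ≤ (((1:Int) :: t).length : Int)
                  then res ++ PySem.List.pyRange s (s + (((1:Int) :: t).length : Int)) 1 else res),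
                 0, []) := by
            rw [pvFA]
            simp only [if_neg hyne, List.nil_append, zero_add]
            rw [hslice]
          rw [hstep]
          have hlen2 : ((1:Int) :: xs').length = ((1:Int) :: t).length + 1 + d'.length := by
            rw [hD] at hlen'
            simp only [List.length_cons] at hlen' ⊢
            omega
          have hrec := ih d'.length (by omega) d' rfl (s + (((1:Int) :: t).length : Int) + 1)
            (if l ≤ (((1:Int) :: t).length : Int)
             then res ++ PySem.List.pyRange s (s + (((1:Int) :: t).length : Int)) 1 else res)
            (by rw [← hn]; push_cast [hlen2]; ring)
          rw [hrec]
          rw [hD] at hgroup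
          rw [hgroup]
          simp only [pvRuns, if_true]
          have hshift := pvRuns_shift y hyne d' (s + ((t.length : Int) + 1))
          rw [hshift]
          simp only [pvEmit, List.flatMap_cons, List.singleton_append]
          have hcast : ((t.length : Int) + 1) = (((1:Int) :: t).length : Int) := by simp
          rw [hcast]
          have hne2 : ¬ (s + (((1:Int) :: t).length : Int) = n) := by
            rw [← hn]; push_cast [hlen2]; omega
          rw [if_neg hne2]
          by_cases hl : l ≤ (((1:Int) :: t).length : Int)
          · rw [if_pos hl, if_pos hl, List.append_assoc]
          · rw [if_neg hl, if_neg hl, List.nil_append]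
      · -- leading non-1 element: the loop state is unchanged and the runs just shift
        have hstep : pvFA l (res, 0, []) (s, x) = (res, 0, []) := by
          rw [pvFA]
          simp only [if_neg hx]
          split_ifs <;> simp [PySem.List.slice]
        rw [PySem.List.enumerate_cons, List.foldl_cons, hstep]
        have hrec := ih xs'.length (by simp only [← hlen, List.length_cons]; omega) xs' rfl (s + 1) res
          (by rw [← hn]; simp only [List.length_cons]; push_cast; ring)
        rw [hrec, pvRuns_shift x hx xs' s]

theorem find_sig_as_enumerate (A : List Int) (l : Int) :
    find_sig A l = pvFinA ((PySem.List.enumerate A 0).foldl (pvFA l) ([], 0, [])) := by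
  rw [find_sig, pvFinA, PySem.List.enumerate_eq_map_pyRange (d := 0), List.foldl_map]
  rfl

theorem find_sig_as_emit (A : List Int) (l : Int) :
    find_sig A l = pvEmit l (PySem.List.len A) (pvRuns (pvGroupbyB A) 0) := by
  rw [find_sig_as_enumerate]
  have := pvMain l (PySem.List.len A) A.length A rfl 0 [] (by simp [PySem.List.len_eq])
  rw [this, List.nil_append]

-- ---------- B-side lemmas ----------

theorem pv_getD_drop (G xs : List Int) (s j : Nat) (h : G.drop s = xs) :
    G.getD (s + j) 0 = xs.getD j 0 := by
  rw [List.getD_eq_getElem?_getD, List.getD_eq_getElem?_getD, ← h, List.getElem?_drop]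

theorem pv_getD_ones (o : List Int) (ho : ∀ y ∈ o, y = 1) (d : List Int) (j : Nat)
    (hj : j < o.length) : (o ++ d).getD j 0 = 1 := by
  rw [List.getD_eq_getElem?_getD, List.getElem?_append_left hj, List.getElem?_eq_getElem hj]
  exact ho _ (List.getElem_mem hj)

theorem pv_prefRun_getD_ones : ∀ (o : List Int), (∀ y ∈ o, y = 1) →
    ∀ (d : List Int) (c : Int) (j : Nat), j < o.length →
    (pvPrefRun (o ++ d) c).getD j 0 = c + j + 1 := by
  intro o
  induction o with
  | nil => intro _ d c j hj; simp at hj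
  | cons y o' ih =>
    intro ho d c j hj
    have hy : y = 1 := ho y (by simp)
    cases j with
    | zero => simp [pvPrefRun, hy]
    | succ j' =>
      subst hy
      have hih := ih (fun z hz => ho z (by simp [hz])) d (c + 1) j' (by simp at hj; omega)
      have hstep : pvPrefRun ((1:Int) :: (o' ++ d)) c = (c + 1) :: pvPrefRun (o' ++ d) (c + 1) := by
        simp [pvPrefRun]
      rw [List.cons_append, hstep, List.getD_cons_succ, hih]
      push_cast; ring

theorem pv_prefRun_drop_ones : ∀ (o : List Int), (∀ y ∈ o, y = 1) →
    ∀ (d : List Int) (c : Int),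
    (pvPrefRun (o ++ d) c).drop o.length = pvPrefRun d (c + o.length) := by
  intro o
  induction o with
  | nil => intro _ d c; simp
  | cons y o' ih =>
    intro ho d c
    have hy : y = 1 := ho y (by simp)
    subst hy
    have hih := ih (fun z hz => ho z (by simp [hz])) d (c + 1)
    have hstep : pvPrefRun ((1:Int) :: (o' ++ d)) c = (c + 1) :: pvPrefRun (o' ++ d) (c + 1) := by
      simp [pvPrefRun]
    rw [List.cons_append, hstep, List.length_cons, List.drop_succ_cons, hih]
    congr 1
    push_cast; ring

theorem pv_suffRun_drop : ∀ (u v : List Int), (pvSuffRun (u ++ v)).drop u.length = pvSuffRun v := by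
  intro u
  induction u with
  | nil => intro v; simp
  | cons x u' ih =>
    intro v
    simp only [List.cons_append, pvSuffRun, List.length_cons, List.drop_succ_cons]
    exact ih v

theorem pv_suffRun_headI_ones : ∀ (o : List Int), (∀ y ∈ o, y = 1) →
    ∀ (d : List Int), (pvSuffRun d).headI = 0 →
    (pvSuffRun (o ++ d)).headI = (o.length : Int) := by
  intro o
  induction o with
  | nil => intro _ d hd; simpa using hd
  | cons y o' ih =>
    intro ho d hd
    have hy : y = 1 := ho y (by simp)
    subst hy
    have hih := ih (fun z hz => ho z (by simp [hz])) d hd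
    have hstep : pvSuffRun ((1:Int) :: (o' ++ d))
        = ((pvSuffRun (o' ++ d)).headI + 1) :: pvSuffRun (o' ++ d) := by
      simp [pvSuffRun]
    rw [List.cons_append, hstep, List.length_cons, List.headI_cons, hih]
    push_cast; ring

theorem pv_suffRun_getD_ones : ∀ (o : List Int), (∀ y ∈ o, y = 1) →
    ∀ (d : List Int), (pvSuffRun d).headI = 0 → ∀ (j : Nat), j < o.length →
    (pvSuffRun (o ++ d)).getD j 0 = (o.length : Int) - j := by
  intro o
  induction o with
  | nil => intro _ d _ j hj; simp at hj
  | cons y o' ih =>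
    intro ho d hd j hj
    have hy : y = 1 := ho y (by simp)
    subst hy
    have ho' : ∀ z ∈ o', z = 1 := fun z hz => ho z (by simp [hz])
    have hstep : pvSuffRun ((1:Int) :: (o' ++ d))
        = ((pvSuffRun (o' ++ d)).headI + 1) :: pvSuffRun (o' ++ d) := by
      simp [pvSuffRun]
    cases j with
    | zero =>
      rw [List.cons_append, hstep, List.getD_cons_zero, List.length_cons,
        pv_suffRun_headI_ones o' ho' d hd]
      push_cast; ring
    | succ j' =>
      have hih := ih ho' d hd j' (by simp at hj; omega)
      rw [List.cons_append, hstep, List.getD_cons_succ, List.length_cons, hih]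
      push_cast; ring

-- main B invariant: the index filter over a suffix equals B's emitted runs of that suffix
theorem pvAltMain (l : Int) : ∀ (m : Nat) (xs : List Int), xs.length = m →
    ∀ (s : Nat) (G p r : List Int),
    G.drop s = xs → p.drop s = pvPrefRun xs 0 → r.drop s = pvSuffRun xs →
    s + xs.length = G.length →
    (PySem.List.pyRange (s : Int) (G.length : Int) 1).filter
      (fun i => decide (PySem.List.pyGetD G i 0 = 1 ∧
        l ≤ PySem.List.pyGetD p i 0 + PySem.List.pyGetD r i 0 - 1))
      = pvEmitB l (pvRuns (pvGroupbyB xs) (s : Int)) := by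
  intro m
  induction m using Nat.strong_induction_on with
  | _ m ih =>
    intro xs hlen s G p r hG hp hr hs
    cases hxs : xs with
    | nil =>
      subst hxs
      have : (s : Int) = (G.length : Int) := by simp at hs; omega
      rw [this, PySem.List.pyRange_one_eq_nil (by omega)]
      simp [pvGroupbyB, pvRuns, pvEmitB]
    | cons x xs' =>
      subst hxs
      by_cases hx : x = 1
      · -- leading maximal run of ones o = 1 :: t, remainder d
        subst hx
        obtain ⟨t, ht⟩ : ∃ t, t = xs'.takeWhile (· == (1:Int)) := ⟨_, rfl⟩
        obtain ⟨d, hd⟩ : ∃ d, d = xs'.dropWhile (· == (1:Int)) := ⟨_, rfl⟩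
        have hxs' : xs' = t ++ d := by rw [ht, hd, List.takeWhile_append_dropWhile]
        have htones : ∀ y ∈ (1:Int) :: t, y = 1 := by
          intro y hy
          rcases List.mem_cons.mp hy with h | h
          · exact h
          · have := List.mem_takeWhile_imp (ht ▸ h)
            simpa using this
        have hsplit : (1:Int) :: xs' = ((1:Int) :: t) ++ d := by rw [hxs']; rfl
        have hgroup : pvGroupbyB (((1:Int) :: t) ++ d) = (1, (t.length : Int) + 1) :: pvGroupbyB d := by
          rw [show ((1:Int) :: t) ++ d = 1 :: xs' from by rw [hxs']; rfl]
          simp only [pvGroupbyB]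
          rw [← ht, ← hd]
        -- the remainder starts with a non-1 element (or is empty)
        have hd0 : (pvSuffRun d).headI = 0 := by
          cases hD : d with
          | nil => simp [pvSuffRun]
          | cons y d' =>
            have hyne : y ≠ 1 := by
              have hdw : xs'.dropWhile (· == (1:Int)) = y :: d' := by rw [← hd]; exact hD
              have h0 : 0 < (xs'.dropWhile (· == (1:Int))).length := by rw [hdw]; simp
              have hnp := List.dropWhile_get_zero_not (p := (· == (1:Int))) xs' h0
              simp only [List.get_eq_getElem] at hnp
              intro hy1
              exact hnp (by simp [hdw, hy1])
            simp [pvSuffRun, hyne]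
        have hdreset : ∀ c : Int, pvPrefRun d c = pvPrefRun d 0 := by
          cases hD : d with
          | nil => intro c; simp [pvPrefRun]
          | cons y d' =>
            have hyne : y ≠ 1 := by
              have hdw : xs'.dropWhile (· == (1:Int)) = y :: d' := by rw [← hd]; exact hD
              have h0 : 0 < (xs'.dropWhile (· == (1:Int))).length := by rw [hdw]; simp
              have hnp := List.dropWhile_get_zero_not (p := (· == (1:Int))) xs' h0
              simp only [List.get_eq_getElem] at hnp
              intro hy1
              exact hnp (by simp [hdw, hy1])
            intro c; simp [pvPrefRun, hyne]
        obtain ⟨o, hoeq⟩ : ∃ o, o = (1:Int) :: t := ⟨_, rfl⟩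
        rw [← hoeq] at hsplit hgroup htones
        have hLpos : 0 < o.length := by rw [hoeq]; simp
        have hlenx : ((1:Int) :: xs').length = o.length + d.length := by
          rw [hsplit]; simp
        -- split the index range at s + o.length
        have hsplitrange := PySem.List.pyRange_one_append (s : Int)
          ((s + o.length : Nat) : Int) (G.length : Int)
          (by push_cast; omega) (by push_cast; omega)
        rw [hsplitrange, List.filter_append]
        -- the segment's condition is constantly  l ≤ o.length
        have hseg : (PySem.List.pyRange (s : Int) ((s + o.length : Nat) : Int) 1).filter
            (fun i => decide (PySem.List.pyGetD G i 0 = 1 ∧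
              l ≤ PySem.List.pyGetD p i 0 + PySem.List.pyGetD r i 0 - 1))
            = if l ≤ (o.length : Int)
              then PySem.List.pyRange (s : Int) ((s + o.length : Nat) : Int) 1 else [] := by
          have hcong : ∀ i ∈ PySem.List.pyRange (s : Int) ((s + o.length : Nat) : Int) 1,
              (decide (PySem.List.pyGetD G i 0 = 1 ∧
                l ≤ PySem.List.pyGetD p i 0 + PySem.List.pyGetD r i 0 - 1))
              = decide (l ≤ (o.length : Int)) := by
            intro i hi
            obtain ⟨h1, h2⟩ := PySem.List.mem_pyRange_one.mp hi
            obtain ⟨j, hij, hj⟩ : ∃ j : Nat, i = ((s + j : Nat) : Int) ∧ j < o.length := by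
              refine ⟨(i - (s : Int)).toNat, by push_cast at h1 h2 ⊢; omega,
                by push_cast at h1 h2; omega⟩
            rw [hij, PySem.List.pyGetD_natCast, PySem.List.pyGetD_natCast,
              PySem.List.pyGetD_natCast]
            rw [pv_getD_drop G ((1:Int) :: xs') s j hG,
              pv_getD_drop p (pvPrefRun ((1:Int) :: xs') 0) s j hp,
              pv_getD_drop r (pvSuffRun ((1:Int) :: xs')) s j hr]
            rw [show (1:Int) :: xs' = o ++ d from hsplit]
            rw [pv_getD_ones o htones d j hj]
            rw [pv_prefRun_getD_ones o htones d 0 j hj]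
            rw [pv_suffRun_getD_ones o htones d hd0 j hj]
            have harith : 0 + (j : Int) + 1 + ((o.length : Int) - j) - 1 = (o.length : Int) := by
              ring
            rw [harith]
            simp
          rw [List.filter_congr hcong]
          by_cases hl : l ≤ (o.length : Int)
          · simp [hl]
          · simp [hl]
        rw [hseg]
        -- the rest is the recursive call on d at position s + o.length
        have hG' : G.drop (s + o.length) = d := by
          rw [← List.drop_drop, hG, hsplit, List.drop_left]
        have hp' : p.drop (s + o.length) = pvPrefRun d 0 := by
          rw [← List.drop_drop, hp, show (1:Int) :: xs' = o ++ d from hsplit,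
            pv_prefRun_drop_ones o htones d 0, hdreset]
        have hr' : r.drop (s + o.length) = pvSuffRun d := by
          rw [← List.drop_drop, hr, show (1:Int) :: xs' = o ++ d from hsplit, pv_suffRun_drop]
        have hlen' : (s + o.length) + d.length = G.length := by
          rw [← hs]; omega
        have hdlt : d.length < m := by
          rw [← hlen]; omega
        have hrec := ih d.length hdlt d rfl (s + o.length) G p r hG' hp' hr' hlen'
        rw [hrec]
        -- assemble the B side
        rw [show (1:Int) :: xs' = o ++ d from hsplit, hgroup]
        have hcast : ((t.length : Int) + 1) = (o.length : Int) := by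
          rw [hoeq]; simp
        have hcast2 : (s : Int) + (o.length : Int) = ((s + o.length : Nat) : Int) := by push_cast; ring
        have hruns : pvRuns ((1, (t.length : Int) + 1) :: pvGroupbyB d) (s : Int)
            = ((s : Int), (t.length : Int) + 1) :: pvRuns (pvGroupbyB d)
                ((s : Int) + ((t.length : Int) + 1)) := by
          simp [pvRuns]
        rw [hruns, hcast, hcast2]
        simp only [pvEmitB, List.flatMap_cons]
        rw [hcast2]
      · -- leading non-1 element
        have hlt : (s : Int) < (G.length : Int) := by
          simp only [List.length_cons] at hs; push_cast; omega
        rw [PySem.List.pyRange_one_cons hlt, List.filter_cons]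
        have hcond : (decide (PySem.List.pyGetD G (s : Int) 0 = 1 ∧
            l ≤ PySem.List.pyGetD p (s : Int) 0 + PySem.List.pyGetD r (s : Int) 0 - 1)) = false := by
          have hGx : G.getD s 0 = x := by
            have := pv_getD_drop G (x :: xs') s 0 hG
            simpa using this
          rw [PySem.List.pyGetD_natCast, hGx]
          simp [hx]
        rw [hcond]
        simp only [Bool.false_eq_true, if_false]
        have hG' : G.drop (s + 1) = xs' := by
          rw [← List.drop_drop, hG]; rfl
        have hp' : p.drop (s + 1) = pvPrefRun xs' 0 := by
          rw [← List.drop_drop, hp]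
          simp [pvPrefRun, hx]
        have hr' : r.drop (s + 1) = pvSuffRun xs' := by
          rw [← List.drop_drop, hr]
          simp [pvSuffRun, hx]
        have hlen' : (s + 1) + xs'.length = G.length := by
          simp only [List.length_cons] at hs; omega
        have hrec := ih xs'.length (by simp only [← hlen, List.length_cons]; omega) xs' rfl
          (s + 1) G p r hG' hp' hr' hlen'
        rw [pvRuns_shift x hx xs' (s : Int)]
        push_cast at hrec
        exact hrec

theorem find_sig_alt_as_emitB (A : List Int) (l : Int) :
    find_sig_alt A l = pvEmitB l (pvRuns (pvGroupbyB A) 0) := by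
  rw [find_sig_alt]
  rw [PySem.List.foldl_append_ite_eq_filter
    (fun i => PySem.List.pyGetD A i 0 = 1 ∧
      l ≤ PySem.List.pyGetD (pvPrefRun A 0) i 0 + PySem.List.pyGetD (pvSuffRun A) i 0 - 1)]
  rw [List.nil_append]
  have := pvAltMain l A.length A rfl 0 A (pvPrefRun A 0) (pvSuffRun A) (by simp) rfl rfl (by simp)
  simp only [Nat.cast_zero] at this
  rw [show PySem.List.len A = (A.length : Int) from by simp [PySem.List.len_eq]]
  exact this

-- ---------- trailing-run lemmas ----------

theorem pv_trail_ones (o : List Int) (ho : ∀ y ∈ o, y = 1) : pvTrail o = o.length := by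
  unfold pvTrail
  rw [List.takeWhile_eq_self_iff.mpr (by
    intro x hx
    have := ho x (List.mem_reverse.mp hx)
    simp [this])]
  simp

theorem pv_trail_cons (x : Int) (hx : x ≠ 1) (xs : List Int) : pvTrail (x :: xs) = pvTrail xs := by
  unfold pvTrail
  rw [show (x :: xs).reverse = xs.reverse ++ [x] from by simp, List.takeWhile_append]
  split_ifs with h
  · have hone : (List.takeWhile (fun z => z == (1:Int)) [x]) = [] := by
      have hxb : (x == (1:Int)) = false := by simp [hx]
      simp [List.takeWhile_cons, hxb]
    rw [hone]
    simp only [List.length_append, List.length_nil]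
    omega
  · rfl

theorem pv_trail_append_ne (u : List Int) (y : Int) (hy : y ≠ 1) (d' : List Int) :
    pvTrail (u ++ y :: d') = pvTrail (y :: d') := by
  unfold pvTrail
  rw [List.reverse_append, List.takeWhile_append]
  split_ifs with h
  · exfalso
    have hpre := List.takeWhile_prefix (p := fun z => z == (1:Int)) (l := (y :: d').reverse)
    have heq := List.IsPrefix.eq_of_length hpre h
    have hall := List.takeWhile_eq_self_iff.mp heq
    have hymem : y ∈ (y :: d').reverse := List.mem_reverse.mpr (by simp)
    have := hall y hymem
    simp [hy] at this
  · rfl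

-- every run has length ≥ 1, ends within bounds, and only a run reaching the end of the
-- list has the trailing-run length
theorem pvRunsFacts : ∀ (m : Nat) (xs : List Int), xs.length = m →
    ∀ (s0 : Int) (rr : Int × Int), rr ∈ pvRuns (pvGroupbyB xs) s0 →
    1 ≤ rr.2 ∧ rr.1 + rr.2 ≤ s0 + xs.length ∧
      (rr.1 + rr.2 = s0 + xs.length → rr.2 = (pvTrail xs : Int)) := by
  intro m
  induction m using Nat.strong_induction_on with
  | _ m ih =>
    intro xs hlen s0 rr hmem
    cases hxs : xs with
    | nil =>
      subst hxs
      simp [pvGroupbyB, pvRuns] at hmem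
    | cons x xs' =>
      subst hxs
      by_cases hx : x = 1
      · subst hx
        obtain ⟨t, ht⟩ : ∃ t, t = xs'.takeWhile (· == (1:Int)) := ⟨_, rfl⟩
        obtain ⟨d, hd⟩ : ∃ d, d = xs'.dropWhile (· == (1:Int)) := ⟨_, rfl⟩
        have hxs' : xs' = t ++ d := by rw [ht, hd, List.takeWhile_append_dropWhile]
        have htones : ∀ y ∈ (1:Int) :: t, y = 1 := by
          intro y hy
          rcases List.mem_cons.mp hy with h | h
          · exact h
          · have := List.mem_takeWhile_imp (ht ▸ h)
            simpa using this
        have hgroup : pvGroupbyB ((1:Int) :: xs') = (1, (t.length : Int) + 1) :: pvGroupbyB d := by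
          simp only [pvGroupbyB]
          rw [← ht, ← hd]
        have hlen2 : xs'.length = t.length + d.length := by rw [hxs']; simp
        rw [hgroup] at hmem
        simp [pvRuns] at hmem
        rcases hmem with rfl | htail
        · refine ⟨?_, ?_, ?_⟩
          · change (1:Int) ≤ (t.length : Int) + 1
            omega
          · change s0 + ((t.length : Int) + 1) ≤ s0 + (((1:Int) :: xs').length : Int)
            push_cast [List.length_cons]
            omega
          · intro hE
            have hE' : s0 + ((t.length : Int) + 1) = s0 + (((1:Int) :: xs').length : Int) := hE
            push_cast [List.length_cons] at hE'
            have hdnil : d.length = 0 := by omega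
            have hdnil' : d = [] := List.length_eq_zero_iff.mp hdnil
            have htr1 : pvTrail ((1:Int) :: xs') = ((1:Int) :: xs').length := by
              apply pv_trail_ones
              have hxeq : (1:Int) :: xs' = 1 :: t := by rw [hxs', hdnil', List.append_nil]
              rw [hxeq]
              exact htones
            rw [htr1]
            change ((t.length : Int) + 1) = _
            push_cast [List.length_cons]
            omega
        · cases hD : d with
          | nil =>
            rw [hD] at htail
            simp [pvGroupbyB, pvRuns] at htail
          | cons y d' =>
            have hyne : y ≠ 1 := by
              have hdw : xs'.dropWhile (· == (1:Int)) = y :: d' := by rw [← hd]; exact hD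
              have h0 : 0 < (xs'.dropWhile (· == (1:Int))).length := by rw [hdw]; simp
              have hnp := List.dropWhile_get_zero_not (p := (· == (1:Int))) xs' h0
              simp only [List.get_eq_getElem] at hnp
              intro hy1
              exact hnp (by simp [hdw, hy1])
            have hm : m = xs'.length + 1 := by rw [← hlen]; simp
            have hdlt : d.length < m := by omega
            obtain ⟨h1, h2, h3⟩ := ih d.length hdlt d rfl (s0 + ((t.length : Int) + 1)) rr htail
            refine ⟨h1, by push_cast [List.length_cons] at h2 ⊢; omega, ?_⟩
            intro hE
            have htr : pvTrail ((1:Int) :: xs') = pvTrail d := by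
              rw [show (1:Int) :: xs' = ((1:Int) :: t) ++ d from by rw [hxs']; rfl, hD]
              exact pv_trail_append_ne _ y hyne d'
            rw [htr]
            apply h3
            push_cast [List.length_cons] at hE ⊢
            omega
      · rw [pvRuns_shift x hx xs' s0] at hmem
        obtain ⟨h1, h2, h3⟩ := ih xs'.length (by simp [← hlen]) xs' rfl (s0 + 1) rr hmem
        refine ⟨h1, by push_cast [List.length_cons] at h2 ⊢; omega, ?_⟩
        intro hE
        rw [pv_trail_cons x hx xs']
        apply h3
        push_cast [List.length_cons] at hE ⊢
        omega

-- when the list ends in a run of ones, that run is the last run and the only one reaching the end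
theorem pvRunsLast : ∀ (m : Nat) (xs : List Int), xs.length = m → pvTrail xs ≠ 0 →
    ∀ (s0 : Int), ∃ rs',
      pvRuns (pvGroupbyB xs) s0
        = rs' ++ [(s0 + xs.length - (pvTrail xs : Int), (pvTrail xs : Int))] ∧
      ∀ r ∈ rs', r.1 + r.2 ≠ s0 + xs.length := by
  intro m
  induction m using Nat.strong_induction_on with
  | _ m ih =>
    intro xs hlen htr s0
    cases hxs : xs with
    | nil =>
      subst hxs
      simp [pvTrail] at htr
    | cons x xs' =>
      subst hxs
      by_cases hx : x = 1
      · subst hx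
        obtain ⟨t, ht⟩ : ∃ t, t = xs'.takeWhile (· == (1:Int)) := ⟨_, rfl⟩
        obtain ⟨d, hd⟩ : ∃ d, d = xs'.dropWhile (· == (1:Int)) := ⟨_, rfl⟩
        have hxs' : xs' = t ++ d := by rw [ht, hd, List.takeWhile_append_dropWhile]
        have htones : ∀ y ∈ (1:Int) :: t, y = 1 := by
          intro y hy
          rcases List.mem_cons.mp hy with h | h
          · exact h
          · have := List.mem_takeWhile_imp (ht ▸ h)
            simpa using this
        have hgroup : pvGroupbyB ((1:Int) :: xs') = (1, (t.length : Int) + 1) :: pvGroupbyB d := by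
          simp only [pvGroupbyB]
          rw [← ht, ← hd]
        have hlen2 : xs'.length = t.length + d.length := by rw [hxs']; simp
        cases hD : d with
        | nil =>
          refine ⟨[], ?_, by simp⟩
          have htr1 : pvTrail ((1:Int) :: xs') = ((1:Int) :: xs').length := by
            apply pv_trail_ones
            have hxeq : (1:Int) :: xs' = 1 :: t := by rw [hxs', hD, List.append_nil]
            rw [hxeq]
            exact htones
          rw [hgroup, hD, htr1]
          have hd0' : d.length = 0 := by rw [hD]; rfl
          simp [pvRuns, pvGroupbyB]
          omega
        | cons y d' =>
          have hyne : y ≠ 1 := by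
            have hdw : xs'.dropWhile (· == (1:Int)) = y :: d' := by rw [← hd]; exact hD
            have h0 : 0 < (xs'.dropWhile (· == (1:Int))).length := by rw [hdw]; simp
            have hnp := List.dropWhile_get_zero_not (p := (· == (1:Int))) xs' h0
            simp only [List.get_eq_getElem] at hnp
            intro hy1
            exact hnp (by simp [hdw, hy1])
          have htreq : pvTrail ((1:Int) :: xs') = pvTrail d := by
            rw [show (1:Int) :: xs' = ((1:Int) :: t) ++ d from by rw [hxs']; rfl, hD]
            exact pv_trail_append_ne _ y hyne d'
          have htrd : pvTrail d ≠ 0 := by rw [← htreq]; exact htr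
          have hm : m = xs'.length + 1 := by rw [← hlen]; simp
          have hdlt : d.length < m := by omega
          obtain ⟨rs', hrs', hne'⟩ := ih d.length hdlt d rfl htrd (s0 + ((t.length : Int) + 1))
          refine ⟨(s0, (t.length : Int) + 1) :: rs', ?_, ?_⟩
          · rw [hgroup, htreq]
            have hruns : pvRuns ((1, (t.length : Int) + 1) :: pvGroupbyB d) s0
                = (s0, (t.length : Int) + 1) :: pvRuns (pvGroupbyB d) (s0 + ((t.length : Int) + 1)) := by
              simp [pvRuns]
            rw [hruns, hrs']
            have hsh : s0 + ((t.length : Int) + 1) + (d.length : Int) - (pvTrail d : Int)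
                = s0 + (((1:Int) :: xs').length : Int) - (pvTrail d : Int) := by
              push_cast [List.length_cons]
              omega
            rw [hsh]
            rfl
          · intro r hr
            rcases List.mem_cons.mp hr with rfl | hh
            · have hdpos : 0 < d.length := by rw [hD]; simp
              change ¬ (s0 + ((t.length : Int) + 1) = s0 + (((1:Int) :: xs').length : Int))
              push_cast [List.length_cons]
              omega
            · have := hne' r hh
              push_cast [List.length_cons] at this ⊢
              omega
      · have htreq : pvTrail (x :: xs') = pvTrail xs' := pv_trail_cons x hx xs'
        have htr' : pvTrail xs' ≠ 0 := by rw [← htreq]; exact htr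
        obtain ⟨rs', hrs', hne'⟩ := ih xs'.length (by simp [← hlen]) xs' rfl htr' (s0 + 1)
        refine ⟨rs', ?_, ?_⟩
        · rw [pvRuns_shift x hx xs' s0, hrs', htreq]
          have hsh : s0 + 1 + (xs'.length : Int) - (pvTrail xs' : Int)
              = s0 + ((x :: xs').length : Int) - (pvTrail xs' : Int) := by
            push_cast [List.length_cons]
            omega
          rw [hsh]
        · intro r hr
          have := hne' r hr
          push_cast [List.length_cons] at this ⊢
          omega

theorem pv_flatMap_congr {rs : List (Int × Int)} {f g : Int × Int → List Int}
    (h : ∀ r ∈ rs, f r = g r) : rs.flatMap f = rs.flatMap g := by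
  induction rs with
  | nil => rfl
  | cons a as ihh =>
    rw [List.flatMap_cons, List.flatMap_cons, h a (by simp),
      ihh (fun r hr => h r (by simp [hr]))]

theorem pvEmit_eq_pvEmitB (A : List Int) (l : Int) (h : ¬ D_find_sig A l) :
    pvEmit l (PySem.List.len A) (pvRuns (pvGroupbyB A) 0)
      = pvEmitB l (pvRuns (pvGroupbyB A) 0) := by
  unfold pvEmit pvEmitB
  apply pv_flatMap_congr
  intro r hr
  have hfacts := pvRunsFacts A.length A rfl 0 r hr
  by_cases hE : r.1 + r.2 = PySem.List.len A
  · have hE' : r.1 + r.2 = 0 + (A.length : Int) := by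
      have hE2 := hE; rw [PySem.List.len_eq] at hE2; omega
    have htr : r.2 = (pvTrail A : Int) := hfacts.2.2 hE'
    have htrne : pvTrail A ≠ 0 := by
      intro h0
      rw [h0] at htr
      have := hfacts.1
      omega
    have hiff : (3 ≤ (pvTrail A : Int)) ↔ (l ≤ (pvTrail A : Int)) := by
      by_contra hc
      exact h ⟨htrne, hc⟩
    rw [if_pos hE]
    by_cases h3 : (3:Int) ≤ r.2
    · rw [if_pos h3, if_pos (by rw [htr] at h3 ⊢; exact hiff.mp h3)]
    · rw [if_neg h3, if_neg (by rw [htr] at h3 ⊢; exact fun hl => h3 (hiff.mpr hl))]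
  · rw [if_neg hE]

-- ===== VERDICT (by name: the statements are the Claim_ definitions above) =====
theorem find_sig_spec : Claim_unchanged_find_sig := by
  intro A l _
  unfold Spec_find_sig
  intro hD
  rw [find_sig_as_emit, find_sig_alt_as_emitB]
  exact pvEmit_eq_pvEmitB A l hD

theorem find_sig_changed : Claim_changed_find_sig := by
  unfold Claim_changed_find_sig; decide

theorem find_sig_tight : Claim_exact_find_sig := by
  intro A l _ hD
  obtain ⟨htr, hiff⟩ := hD
  obtain ⟨rs', hrs', hne'⟩ := pvRunsLast A.length A rfl htr 0
  rw [find_sig_as_emit, find_sig_alt_as_emitB, hrs']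
  unfold pvEmit pvEmitB
  rw [List.flatMap_append, List.flatMap_append]
  have hcommon : rs'.flatMap (fun r =>
      if (if r.1 + r.2 = PySem.List.len A then (3:Int) else l) ≤ r.2
      then PySem.List.pyRange r.1 (r.1 + r.2) 1 else [])
      = rs'.flatMap (fun r => if l ≤ r.2 then PySem.List.pyRange r.1 (r.1 + r.2) 1 else []) := by
    apply pv_flatMap_congr
    intro r hr
    have hne := hne' r hr
    have hC : ¬ (r.1 + r.2 = PySem.List.len A) := by
      intro hEq
      rw [PySem.List.len_eq] at hEq
      exact hne (by omega)
    rw [if_neg hC]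
  rw [hcommon]
  intro hcontra
  have hcancel := List.append_cancel_left hcontra
  set st : Int := 0 + (A.length : Int) - (pvTrail A : Int) with hst
  have hEnd : st + (pvTrail A : Int) = PySem.List.len A := by
    rw [hst, PySem.List.len_eq]; ring
  simp only [List.flatMap_cons, List.flatMap_nil, List.append_nil] at hcancel
  rw [if_pos hEnd] at hcancel
  have hlenseg : (PySem.List.pyRange st (st + (pvTrail A : Int)) 1).length = pvTrail A := by
    rw [PySem.List.length_pyRange_one]; omega
  have hsegne : (PySem.List.pyRange st (st + (pvTrail A : Int)) 1) ≠ [] := by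
    intro h0
    rw [h0] at hlenseg
    simp at hlenseg
    omega
  by_cases h3 : (3:Int) ≤ (pvTrail A : Int)
  · have hnl : ¬ l ≤ (pvTrail A : Int) := fun hl => hiff (by constructor <;> intro <;> assumption)
    rw [if_pos h3, if_neg hnl] at hcancel
    exact hsegne hcancel
  · have hl : l ≤ (pvTrail A : Int) := by
      by_contra hnl
      exact hiff ⟨fun hh => absurd hh h3, fun hh => absurd hh hnl⟩
    rw [if_neg h3, if_pos hl] at hcancel
    exact hsegne hcancel.symm
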